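-- pv_equiv track=rewrite | github.com/sherry975-rxi/GAN_HoneyFlow | dataset.py | _build
-- ===== SOURCE A (Python) =====
-- import collections
--
-- def _build(corpus, clip=1):
--     # vocab = collections.Counter()
--     vocab = collections.defaultdict(int)
--     # corpus = ['ultimately feels like just one more in the long line of films this year about', 'uncommonly pleasurable']
--     for sent in corpus:
--         for tokens in sent:
--             if tokens == '':
--                 continue
--             vocab[tokens] = vocab.get(tokens, 0) + 1
--
--
--     for word in list(vocab.keys()):
--         if vocab[word] < clip:
--             vocab.pop(word)
--
--     return list(sorted(vocab.keys()))
-- ===== SOURCE B (Python) =====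
-- def _build(corpus, clip=1):
--     toks = sorted(t for sent in corpus for t in sent if t != '')
--     out = []
--     i, n = 0, len(toks)
--     while i < n:
--         j = i
--         while j < n and toks[j] == toks[i]:
--             j += 1
--         if j - i >= clip:
--             out.append(toks[i])
--         i = j
--     return out
-- ===== Notes on version B (the rewrite author's own statement) =====
-- stated objective: alternative
-- what changed: B flattens the non-empty tokens, sorts them once, and emits each maximal run whose length reaches clip in one scan, instead of A's hash-table frequency count followed by a key-deletion pass and a final sort of the keys.
import Mathlib
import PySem

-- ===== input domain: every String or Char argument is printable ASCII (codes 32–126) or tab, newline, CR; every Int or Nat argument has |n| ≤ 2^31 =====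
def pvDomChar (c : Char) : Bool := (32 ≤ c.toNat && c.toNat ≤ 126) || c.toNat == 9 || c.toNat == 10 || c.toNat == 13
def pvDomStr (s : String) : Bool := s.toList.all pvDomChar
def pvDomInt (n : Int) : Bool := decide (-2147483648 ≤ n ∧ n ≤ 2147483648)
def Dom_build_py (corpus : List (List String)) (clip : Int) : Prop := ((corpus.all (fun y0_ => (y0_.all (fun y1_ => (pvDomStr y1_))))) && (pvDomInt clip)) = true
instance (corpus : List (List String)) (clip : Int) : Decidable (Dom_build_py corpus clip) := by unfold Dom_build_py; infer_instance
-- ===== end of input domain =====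

-- B replaces A's hash-count-then-sort-keys with sort-all-tokens-first then one run-length scan (alternative decomposition, similar cost).

-- ===== PORT A =====
def build_py (corpus : List (List String)) (clip : Int) : List String :=
  let vocab : PySem.Dict String Int :=
    corpus.foldl (fun vocab sent =>
      sent.foldl (fun vocab tokens =>
        if tokens == "" then vocab
        else vocab.insert tokens (vocab.getD tokens 0 + 1)) vocab)
      PySem.Dict.empty
  let vocab2 :=
    vocab.keys.foldl (fun vocab word =>
      if vocab.getD word 0 < clip then vocab.erase word else vocab) vocab
  PySem.List.sorted vocab2.keys (fun x => x)

-- ===== PORT B =====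
-- the outer while loop of Source B: each step consumes one maximal run of equal tokens
def scanRuns (clip : Int) : List String → List String
  | [] => []
  | x :: rest =>
    (if clip ≤ ((rest.takeWhile (fun y => y == x)).length : Int) + 1 then [x] else []) ++
      scanRuns clip (rest.dropWhile (fun y => y == x))
termination_by l => l.length
decreasing_by simpa using Nat.lt_succ_of_le (List.length_dropWhile_le _ _)

def build_py_alt (corpus : List (List String)) (clip : Int) : List String :=
  let toks := PySem.List.sorted (corpus.flatMap (fun sent => sent.filter (fun t => !(t == "")))) (fun x => x)
  scanRuns clip toks

-- ===== PRECONDITION & SPEC =====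
def Spec_build_py (corpus : List (List String)) (clip : Int) (out : List String) : Prop := out = build_py_alt corpus clip
instance (corpus : List (List String)) (clip : Int) (out : List String) : Decidable (Spec_build_py corpus clip out) := by unfold Spec_build_py; infer_instance

-- ===== CLAIM (what is proved, stated in full; the proofs are below) =====
def Claim_equal_build_py : Prop := ∀ (corpus : List (List String)) (clip : Int), Dom_build_py corpus clip → Spec_build_py corpus clip (build_py corpus clip)

-- ===== LEMMAS AND PROOFS =====

theorem find?_filter_ne {ν : Type} (k w : String) (h : w ≠ k) (l : List (String × ν)) :
    List.find? (fun p => p.1 == w) (l.filter (fun p => !(p.1 == k)))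
      = List.find? (fun p => p.1 == w) l := by
  have h' : k ≠ w := Ne.symm h
  induction l with
  | nil => rfl
  | cons p l ih =>
    by_cases hk : p.1 = k
    · have hw : p.1 ≠ w := fun e => h (e ▸ hk)
      simp [List.filter_cons, List.find?_cons, hk, hw, ih, h, h']
    · by_cases hw : p.1 = w
      · simp [List.filter_cons, List.find?_cons, hk, hw, h, h']
      · simp [List.filter_cons, List.find?_cons, hk, hw, ih, h, h']

theorem getD_erase_ne (d : PySem.Dict String Int) (k w : String) (h : w ≠ k) :
    (d.erase k).getD w 0 = d.getD w 0 := by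
  unfold PySem.Dict.erase PySem.Dict.getD PySem.Dict.get?
  rw [find?_filter_ne k w h]

theorem eraseLoop (clip : Int) (c : String → Int) :
    ∀ (ws : List String) (d : PySem.Dict String Int), ws.Nodup →
    (∀ w ∈ ws, d.getD w 0 = c w) →
    (ws.foldl (fun v w => if v.getD w 0 < clip then v.erase w else v) d).items
      = d.items.filter (fun p => !(decide (p.1 ∈ ws) && decide (c p.1 < clip))) := by
  intro ws
  induction ws with
  | nil => intro d _ _; simp
  | cons w tl ih =>
    intro d hnd hc
    have hw : d.getD w 0 = c w := hc w (by simp)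
    rcases List.nodup_cons.mp hnd with ⟨hwtl, hndtl⟩
    by_cases hlt : c w < clip
    · have : (List.foldl (fun v w => if v.getD w 0 < clip then v.erase w else v) d (w :: tl))
          = List.foldl (fun v w => if v.getD w 0 < clip then v.erase w else v) (d.erase w) tl := by
        simp [List.foldl, hw, hlt]
      rw [this, ih (d.erase w) hndtl (fun w' hw' => by
        have hne : w' ≠ w := fun he => hwtl (by rwa [he] at hw')
        rw [getD_erase_ne _ _ _ hne]; exact hc w' (List.mem_cons_of_mem _ hw'))]
      show (d.erase w).items.filter _ = _
      unfold PySem.Dict.erase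
      rw [List.filter_filter]
      apply List.filter_congr
      intro p _
      by_cases hp : p.1 = w
      · simp [hp, hlt]
      · simp [hp]
    · have : (List.foldl (fun v w => if v.getD w 0 < clip then v.erase w else v) d (w :: tl))
          = List.foldl (fun v w => if v.getD w 0 < clip then v.erase w else v) d tl := by
        simp [List.foldl, hw, hlt]
      rw [this, ih d hndtl (fun w' hw' => hc w' (List.mem_cons_of_mem _ hw'))]
      apply List.filter_congr
      intro p _
      by_cases hp : p.1 = w
      · simp [hp, hlt, hwtl]
      · simp [hp]

-- A computes: sorted(distinct non-empty tokens with count ≥ clip)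
theorem build_py_eq (corpus : List (List String)) (clip : Int) :
    build_py corpus clip
      = PySem.List.sorted
          ((PySem.Set.ofList (corpus.flatMap (fun sent => sent.filter (fun t => !(t == ""))))).filter
            (fun w => !decide ((List.count w (corpus.flatMap (fun sent => sent.filter (fun t => !(t == "")))) : Int) < clip)))
          (fun x => x) := by
  set flat := corpus.flatMap (fun sent => sent.filter (fun t => !(t == ""))) with hflat
  have hvocab :
      corpus.foldl (fun vocab sent =>
        sent.foldl (fun vocab tokens =>
          if tokens == "" then vocab
          else vocab.insert tokens (vocab.getD tokens 0 + 1)) vocab)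
        (PySem.Dict.empty : PySem.Dict String Int) = PySem.Dict.counter flat := by
    have hsent : ∀ (sent : List String) (v : PySem.Dict String Int),
        sent.foldl (fun vocab tokens =>
          if tokens == "" then vocab
          else vocab.insert tokens (vocab.getD tokens 0 + 1)) v
        = (sent.filter (fun t => !(t == ""))).foldl
            (fun vocab tokens => vocab.insert tokens (vocab.getD tokens 0 + 1)) v := by
      intro sent v
      rw [← PySem.List.foldl_if_eq_foldl_filter (p := fun t => !(t == ""))]
      congr 1
      funext v t
      by_cases h : t = "" <;> simp [h]
    calc corpus.foldl (fun vocab sent =>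
        sent.foldl (fun vocab tokens =>
          if tokens == "" then vocab
          else vocab.insert tokens (vocab.getD tokens 0 + 1)) vocab)
          (PySem.Dict.empty : PySem.Dict String Int)
        = (corpus.map (fun sent => sent.filter (fun t => !(t == "")))).foldl
            (fun v s => s.foldl (fun vocab tokens => vocab.insert tokens (vocab.getD tokens 0 + 1)) v)
            (PySem.Dict.empty : PySem.Dict String Int) := by
          rw [List.foldl_map]
          apply PySem.List.foldl_congr_mem
          intro v sent _
          exact hsent sent v
      _ = flat.foldl (fun vocab tokens => vocab.insert tokens (vocab.getD tokens 0 + 1))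
            (PySem.Dict.empty : PySem.Dict String Int) := by
          rw [hflat, List.flatMap_def, ← List.foldl_flatten]
      _ = PySem.Dict.counter flat := PySem.Dict.foldl_insert_getD_add_one_eq_counter flat
  have hitems := eraseLoop clip (fun w => (List.count w flat : Int)) (PySem.Dict.counter flat).keys
    (PySem.Dict.counter flat) (PySem.Dict.nodup_keys_counter flat)
    (fun w _ => PySem.Dict.getD_counter flat w)
  have hfilter :
      (PySem.Dict.counter flat).items.filter
        (fun p => !(decide (p.1 ∈ (PySem.Dict.counter flat).keys) && decide ((List.count p.1 flat : Int) < clip)))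
      = (PySem.Dict.counter flat).items.filter
          (fun p => !decide ((List.count p.1 flat : Int) < clip)) := by
    apply List.filter_congr
    intro p hp
    have hm : p.1 ∈ (PySem.Dict.counter flat).keys := PySem.Dict.mem_keys_of_mem_items _ hp
    rw [PySem.Dict.keys_counter] at hm
    simp [hm]
  have hkeys2 :
      (List.foldl (fun v w => if v.getD w 0 < clip then v.erase w else v)
        (PySem.Dict.counter flat) (PySem.Dict.counter flat).keys).items.map (fun x => x.1)
      = (PySem.Set.ofList flat).filter (fun w => !decide ((List.count w flat : Int) < clip)) := by
    rw [hitems, hfilter, PySem.Dict.items_counter, List.filter_map, List.map_map]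
    simp [Function.comp_def]
  unfold build_py
  rw [hvocab]
  exact congrArg (fun l => PySem.List.sorted l (fun x => x)) hkeys2

theorem scanRuns_spec (clip : Int) : ∀ (xs : List String), xs.Pairwise (· ≤ ·) →
    (scanRuns clip xs).Pairwise (· < ·) ∧
    (∀ y, y ∈ scanRuns clip xs ↔ (y ∈ xs ∧ clip ≤ (List.count y xs : Int))) := by
  intro xs
  induction xs using scanRuns.induct with
  | case1 =>
    intro _
    refine ⟨by simp [scanRuns], fun y => by simp [scanRuns]⟩
  | case2 x rest ih =>
    intro hs
    have hrest : rest.Pairwise (· ≤ ·) := hs.of_cons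
    have hxle : ∀ y ∈ rest, x ≤ y := fun y hy => List.rel_of_pairwise_cons hs hy
    set run := rest.takeWhile (fun y => y == x) with hrun
    set ra := rest.dropWhile (fun y => y == x) with hra
    have hsplit : run ++ ra = rest := List.takeWhile_append_dropWhile
    have hrunx : ∀ y ∈ run, y = x := fun y hy => by
      have := List.mem_takeWhile_imp hy; simpa using this
    have hraP : ra.Pairwise (· ≤ ·) := List.Pairwise.sublist (List.dropWhile_sublist _) hrest
    have hgt : ∀ y ∈ ra, x < y := by
      intro y hy
      cases hraeq : ra with
      | nil => rw [hraeq] at hy; simp at hy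
      | cons h tl =>
        have hne : ra ≠ [] := by rw [hraeq]; simp
        have hh : ((fun y => y == x) (ra.head hne)) = false := List.head_dropWhile_not _ hne
        have hhead : ra.head hne = h := by simp [hraeq]
        have hhx : h ≠ x := by rw [hhead] at hh; simpa using hh
        have hxh : x < h := lt_of_le_of_ne
          (hxle h ((List.dropWhile_sublist _).mem (hraeq ▸ List.mem_cons_self)))
          (Ne.symm hhx)
        rw [hraeq] at hy
        rcases List.mem_cons.mp hy with rfl | hytl
        · exact hxh
        · exact lt_of_lt_of_le hxh (List.rel_of_pairwise_cons (hraeq ▸ hraP) hytl)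
    have hxra : x ∉ ra := fun hx => absurd (hgt x hx) (lt_irrefl x)
    have hcx : List.count x (x :: rest) = run.length + 1 := by
      rw [List.count_cons_self, ← hsplit, List.count_append]
      rw [List.count_eq_zero.mpr hxra, List.count_eq_length.mpr (fun b hb => (hrunx b hb).symm)]
    obtain ⟨ihP, ihM⟩ := ih hraP
    constructor
    · by_cases hc : clip ≤ (run.length : Int) + 1
      · simp only [scanRuns, ← hrun, ← hra, if_pos hc, List.singleton_append]
        exact List.pairwise_cons.mpr ⟨fun z hz => hgt z ((ihM z).mp hz).1, ihP⟩
      · simp only [scanRuns, ← hrun, ← hra, if_neg hc, List.nil_append]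
        exact ihP
    · intro y
      have hstep : scanRuns clip (x :: rest)
          = (if clip ≤ ((run.length : Int)) + 1 then [x] else []) ++ scanRuns clip ra := by
        simp [scanRuns, ← hrun, ← hra]
      rw [hstep]
      by_cases hyx : y = x
      · subst hyx
        have hnotin : y ∉ scanRuns clip ra := fun h => hxra ((ihM y).mp h).1
        constructor
        · intro hmem
          refine ⟨List.mem_cons_self, ?_⟩
          rw [hcx]
          rcases List.mem_append.mp hmem with h1 | h2
          · by_cases hc : clip ≤ (run.length : Int) + 1
            · push_cast; omega
            · rw [if_neg hc] at h1; simp at h1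
          · exact absurd h2 hnotin
        · rintro ⟨-, hcnt⟩
          rw [hcx] at hcnt
          apply List.mem_append.mpr; left
          rw [if_pos (by push_cast at hcnt ⊢; omega)]
          simp
      · have hyrun : y ∉ run := fun h => hyx (hrunx y h)
        have hcy : List.count y (x :: rest) = List.count y ra := by
          rw [List.count_cons_of_ne (Ne.symm hyx), ← hsplit, List.count_append,
            List.count_eq_zero.mpr hyrun, Nat.zero_add]
        have hmem1 : y ∈ x :: rest ↔ y ∈ ra := by
          constructor
          · intro h
            rcases List.mem_cons.mp h with rfl | h2
            · exact absurd rfl hyx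
            · rw [← hsplit] at h2
              rcases List.mem_append.mp h2 with h3 | h4
              · exact absurd h3 hyrun
              · exact h4
          · intro h; exact List.mem_cons_of_mem _ ((List.dropWhile_sublist _).mem h)
        have : y ∈ (if clip ≤ ((run.length : Int)) + 1 then [x] else []) ++ scanRuns clip ra
            ↔ y ∈ scanRuns clip ra := by
          rcases (em (clip ≤ (run.length : Int) + 1)) with hc | hc <;> simp [hc, hyx]
        rw [this, ihM y, hcy, hmem1]

-- ===== VERDICT (by name: the statement is the Claim_ definition above) =====
theorem build_py_spec : Claim_equal_build_py := by
  intro corpus clip _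
  unfold Spec_build_py
  simp only [build_py_alt]
  rw [build_py_eq]
  set flat := corpus.flatMap (fun sent => sent.filter (fun t => !(t == ""))) with hflat
  set xs := PySem.List.sorted flat (fun x => x) with hxs
  have hsP : xs.Pairwise (· ≤ ·) := PySem.List.sorted_pairwise flat (fun x => x)
  obtain ⟨hP, hM⟩ := scanRuns_spec clip xs hsP
  apply PySem.List.sorted_eq_of_perm_of_pairwise_lt
  · rw [List.perm_ext_iff_of_nodup
      (hP.imp (fun {a b} h => ne_of_lt h))
      ((PySem.Set.nodup_ofList flat).filter _)]
    intro y
    rw [hM y]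
    have hcnt : List.count y xs = List.count y flat := (PySem.List.sorted_perm flat (fun x => x) false).count_eq y
    have hmem : y ∈ xs ↔ y ∈ flat := PySem.List.mem_sorted flat (fun x => x) false y
    rw [hcnt, hmem, List.mem_filter, PySem.Set.mem_ofList]
    simp [not_lt]
  · exact hP
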